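-- pv_equiv track=rewrite | github.com/Diligent0924/Programmers | 2단계!/귤까먹기.py | solution
-- ===== SOURCE A (Python) =====
-- from collections import Counter
--
-- def solution(k, tangerine):
--     result = 0
--     value_list = Counter(tangerine).most_common()
--     for i, v in value_list:
--         result += 1
--         k -= v
--         if k <=0:
--             break
--     return result
-- ===== SOURCE B (Python) =====
-- from collections import Counter
--
-- def solution(k, tangerine):
--     if not tangerine:
--         return 0
--     cnt = Counter(tangerine)
--     fof = Counter(cnt.values())
--     result = 0
--     for f in range(max(cnt.values()), 0, -1):
--         for _ in range(fof[f]):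
--             result += 1
--             k -= f
--             if k <= 0:
--                 return result
--     return result
-- ===== Notes on version B (the rewrite author's own statement) =====
-- stated objective: alternative
-- what changed: B replaces Counter.most_common()'s comparison sort and single break-loop with a frequency-of-frequency bucket table scanned once from the maximum count down to 1 (a counting-sort-style descending scan), returning as soon as k is exhausted.
import Mathlib
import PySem

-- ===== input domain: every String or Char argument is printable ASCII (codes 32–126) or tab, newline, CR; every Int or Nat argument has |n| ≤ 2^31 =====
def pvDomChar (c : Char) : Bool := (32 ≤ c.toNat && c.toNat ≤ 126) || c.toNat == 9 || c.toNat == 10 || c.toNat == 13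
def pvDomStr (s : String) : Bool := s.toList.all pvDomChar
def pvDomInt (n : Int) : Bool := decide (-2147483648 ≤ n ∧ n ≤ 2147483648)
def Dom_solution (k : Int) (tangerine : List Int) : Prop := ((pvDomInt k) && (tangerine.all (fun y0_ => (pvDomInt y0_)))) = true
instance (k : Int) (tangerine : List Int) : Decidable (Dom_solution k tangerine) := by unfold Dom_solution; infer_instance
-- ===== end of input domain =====

-- B replaces most_common()'s comparison sort with a frequency-of-frequency bucket scan from the maximum count downward (alternative decomposition, same results).


-- ===== PORT A =====
-- the for-loop with break over most_common() pairs
def solutionLoop : Int → Int → List (Int × Int) → Int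
  | result, _, [] => result
  | result, k, (_, v) :: rest =>
      if k - v ≤ 0 then result + 1 else solutionLoop (result + 1) (k - v) rest

-- Counter(xs).most_common() = sorted(items, key=itemgetter(1), reverse=True) (stable)
def solution (k : Int) (tangerine : List Int) : Int :=
  solutionLoop 0 k (PySem.List.sorted (PySem.Dict.counter tangerine).items (fun p => p.2) true)

-- ===== PORT B =====
-- inner 'for _ in range(fof[f])' loop; returns (result, k, returned?)
def bInner : Int → Nat → Int → Int → Int × Int × Bool
  | _, 0, result, k => (result, k, false)
  | f, n+1, result, k =>
      if k - f ≤ 0 then (result + 1, k - f, true)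
      else bInner f n (result + 1) (k - f)

-- outer 'for f in range(max(...), 0, -1)' loop
def bOuter : List Int → PySem.Dict Int Int → Int → Int → Int
  | [], _, result, _ => result
  | f :: fs, fof, result, k =>
      match bInner f (fof.getD f 0).toNat result k with
      | (result', _, true) => result'
      | (result', k', false) => bOuter fs fof result' k'

def solution_alt (k : Int) (tangerine : List Int) : Int :=
  if tangerine = [] then 0
  else
    let cnt := PySem.Dict.counter tangerine
    let fof := PySem.Dict.counter cnt.values
    bOuter (PySem.List.pyRange ((PySem.List.max? cnt.values (fun x => x)).getD 0) 0 (-1)) fof 0 k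

-- ===== PRECONDITION & SPEC =====
def Spec_solution (k : Int) (tangerine : List Int) (out : Int) : Prop := out = solution_alt k tangerine
instance (k : Int) (tangerine : List Int) (out : Int) : Decidable (Spec_solution k tangerine out) := by unfold Spec_solution; infer_instance

-- ===== CLAIM (what is proved, stated in full; the proofs are below) =====
def Claim_equal_solution : Prop := ∀ (k : Int) (tangerine : List Int), Dom_solution k tangerine → Spec_solution k tangerine (solution k tangerine)

-- ===== LEMMAS AND PROOFS =====

-- abstract "take kinds by count until k ≤ 0" scanner: (taken, remaining k, stopped?)
def pvScan : Int → List Int → Int × Int × Bool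
  | k, [] => (0, k, false)
  | k, v :: vs =>
      if k - v ≤ 0 then (1, k - v, true)
      else
        let r := pvScan (k - v) vs
        (r.1 + 1, r.2)

theorem pvScan_append (l1 l2 : List Int) : ∀ k : Int,
    pvScan k (l1 ++ l2) =
      if (pvScan k l1).2.2 then pvScan k l1
      else ((pvScan k l1).1 + (pvScan (pvScan k l1).2.1 l2).1, (pvScan (pvScan k l1).2.1 l2).2) := by
  induction l1 with
  | nil => intro k; simp [pvScan]
  | cons v vs ih =>
    intro k
    by_cases h : k - v ≤ 0
    · simp [pvScan, h]
    · simp only [List.cons_append, pvScan, h, if_false, ih (k - v)]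
      by_cases h2 : (pvScan (k - v) vs).2.2 <;> simp [h2] <;> ring_nf

theorem solutionLoop_eq (l : List (Int × Int)) : ∀ result k : Int,
    solutionLoop result k l = result + (pvScan k (l.map (·.2))).1 := by
  induction l with
  | nil => intro result k; simp [solutionLoop, pvScan]
  | cons p rest ih =>
    intro result k
    by_cases h : k - p.2 ≤ 0
    · simp [solutionLoop, pvScan, h]
    · simp only [List.map_cons, solutionLoop, pvScan, h, if_false, ih]
      ring_nf

theorem bInner_eq (f : Int) : ∀ (n : Nat) (result k : Int),
    bInner f n result k = (result + (pvScan k (List.replicate n f)).1, (pvScan k (List.replicate n f)).2) := by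
  intro n
  induction n with
  | zero => intro result k; simp [bInner, pvScan]
  | succ m ih =>
    intro result k
    by_cases h : k - f ≤ 0
    · simp [bInner, List.replicate_succ, pvScan, h]
    · simp only [bInner, List.replicate_succ, pvScan, h, if_false, ih]
      ring_nf

theorem bOuter_eq (fof : PySem.Dict Int Int) : ∀ (fs : List Int) (result k : Int),
    bOuter fs fof result k =
      result + (pvScan k (fs.flatMap (fun f => List.replicate (fof.getD f 0).toNat f))).1 := by
  intro fs
  induction fs with
  | nil => intro result k; simp [bOuter, pvScan]
  | cons f rest ih =>
    intro result k
    have hb := bInner_eq f (fof.getD f 0).toNat result k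
    rw [List.flatMap_cons, pvScan_append]
    rcases ht : pvScan k (List.replicate (fof.getD f 0).toNat f) with ⟨c, kk, d⟩
    rw [ht] at hb
    cases d
    · simp [bOuter, hb, ih, add_assoc]
    · simp [bOuter, hb]

theorem count_expand (g : Int → Nat) (x : Int) :
    ∀ fs : List Int, fs.Nodup →
      (fs.flatMap (fun f => List.replicate (g f) f)).count x = if x ∈ fs then g x else 0 := by
  intro fs
  induction fs with
  | nil => simp
  | cons f rest ih =>
    intro hnd
    rw [List.nodup_cons] at hnd
    rw [List.flatMap_cons, List.count_append, ih hnd.2]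
    by_cases hx : x = f
    · subst hx
      simp [List.count_replicate, hnd.1]
    · simp [List.count_replicate, hx, Ne.symm hx]

-- the two descending count lists coincide: map-snd of most_common = the bucket expansion
theorem lists_eq (t : List Int) (hne : t ≠ []) :
    ((PySem.List.sorted (PySem.Dict.counter t).items (fun p => p.2) true).map (fun p => p.2))
      = (PySem.List.pyRange ((PySem.List.max? (PySem.Dict.counter t).values (fun x => x)).getD 0) 0 (-1)).flatMap
          (fun f => List.replicate ((PySem.Dict.counter (PySem.Dict.counter t).values).getD f 0).toNat f) := by
  have hvm : (PySem.Dict.counter t).values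
      = (PySem.Set.ofList t).map (fun kk => ((t.count kk : Int))) := by
    simp [PySem.Dict.values, PySem.Dict.items_counter, List.map_map, Function.comp]
  have hpos : ∀ x ∈ (PySem.Dict.counter t).values, 0 < x := by
    rw [hvm]; intro x hx
    simp only [List.mem_map] at hx
    obtain ⟨kk, hk, rfl⟩ := hx
    rw [PySem.Set.mem_ofList] at hk
    exact_mod_cast List.count_pos_iff.mpr hk
  have hvne : (PySem.Dict.counter t).values ≠ [] := by
    rw [hvm]
    rcases t with _ | ⟨a, t'⟩
    · exact absurd rfl hne
    · intro hcon
      rw [List.map_eq_nil_iff] at hcon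
      have ha : a ∈ PySem.Set.ofList (a :: t') := (PySem.Set.mem_ofList _ _).mpr (by simp)
      rw [hcon] at ha
      simp at ha
  obtain ⟨m, hm⟩ : ∃ m, PySem.List.max? (PySem.Dict.counter t).values (fun x => x) = some m := by
    rcases h : PySem.List.max? (PySem.Dict.counter t).values (fun x => x) with _ | m
    · exact absurd ((PySem.List.max?_eq_none_iff _ _).mp h) hvne
    · exact ⟨m, rfl⟩
  have hub : ∀ x ∈ (PySem.Dict.counter t).values, x ≤ m := PySem.List.max?_isMax hm
  rw [hm]
  simp only [Option.getD_some]
  have hrev : PySem.List.pyRange m 0 (-1) = (PySem.List.pyRange 1 (m + 1)).reverse := by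
    rw [PySem.List.pyRange_neg_one_eq_reverse]; norm_num
  have hnd : (PySem.List.pyRange m 0 (-1)).Nodup := by
    rw [hrev, List.nodup_reverse]; exact PySem.List.nodup_pyRange_one _ _
  have hpw : (PySem.List.pyRange m 0 (-1)).Pairwise (fun a b => b < a) := by
    rw [hrev]; exact List.pairwise_reverse.mpr (PySem.List.pairwise_lt_pyRange_one _ _)
  have hg : ∀ f : Int, ((PySem.Dict.counter (PySem.Dict.counter t).values).getD f 0).toNat
      = (PySem.Dict.counter t).values.count f := by
    intro f; rw [PySem.Dict.getD_counter]; exact Int.toNat_natCast _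
  -- left side: a permutation of values, sorted descending
  have hLperm : ((PySem.List.sorted (PySem.Dict.counter t).items (fun p => p.2) true).map
      (fun p : Int × Int => p.2)).Perm (PySem.Dict.counter t).values :=
    (PySem.List.sorted_perm (PySem.Dict.counter t).items (fun p : Int × Int => p.2) true).map _
  have hLpw : ((PySem.List.sorted (PySem.Dict.counter t).items (fun p => p.2) true).map
      (fun p : Int × Int => p.2)).Pairwise (fun a b => b ≤ a) := by
    rw [List.pairwise_map]
    exact PySem.List.sorted_pairwise_rev _ _
  -- right side: same multiset by counting, sorted descending by construction
  have hRcount : ∀ x : Int, ((PySem.List.pyRange m 0 (-1)).flatMap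
      (fun f => List.replicate ((PySem.Dict.counter (PySem.Dict.counter t).values).getD f 0).toNat f)).count x
      = (PySem.Dict.counter t).values.count x := by
    intro x
    rw [count_expand _ _ _ hnd]
    by_cases hx : x ∈ PySem.List.pyRange m 0 (-1)
    · rw [if_pos hx, hg]
    · rw [if_neg hx]
      symm
      rw [List.count_eq_zero]
      intro hxv
      exact hx (PySem.List.mem_pyRange_neg_one.mpr ⟨hpos x hxv, hub x hxv⟩)
  have hRperm : ((PySem.List.pyRange m 0 (-1)).flatMap
      (fun f => List.replicate ((PySem.Dict.counter (PySem.Dict.counter t).values).getD f 0).toNat f)).Perm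
      (PySem.Dict.counter t).values := List.perm_iff_count.mpr hRcount
  have hRpw : ((PySem.List.pyRange m 0 (-1)).flatMap
      (fun f => List.replicate ((PySem.Dict.counter (PySem.Dict.counter t).values).getD f 0).toNat f)).Pairwise
      (fun a b => b ≤ a) := by
    rw [List.flatMap_def, List.pairwise_flatten]
    constructor
    · intro l hl
      simp only [List.mem_map] at hl
      obtain ⟨f, _, rfl⟩ := hl
      exact List.pairwise_replicate.mpr (Or.inr le_rfl)
    · rw [List.pairwise_map]
      refine hpw.imp_of_mem ?_
      intro f1 f2 _ _ hlt x hx y hy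
      rw [List.eq_of_mem_replicate hx, List.eq_of_mem_replicate hy]
      exact le_of_lt hlt
  exact List.Perm.eq_of_pairwise (fun a b _ _ h1 h2 => le_antisymm h2 h1) hLpw hRpw
    (hLperm.trans hRperm.symm)

-- ===== VERDICT =====
theorem solution_spec : Claim_equal_solution := by
  intro k t _
  unfold Spec_solution solution solution_alt
  by_cases hne : t = []
  · subst hne; rfl
  · simp only [if_neg hne]
    rw [solutionLoop_eq, bOuter_eq, lists_eq t hne]
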